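-- pv_equiv track=rewrite | github.com/yeseongcho/- | ICT 문제해결기법/PA3/FINAL_PA3.py | make_short
-- ===== SOURCE A (Python) =====
-- def find_index_p(func, p, start, end) :
--     mid = (start+end)//2
--     if p <= func[0][0] :
--         return 0
--     elif p == func[mid][0] :
--         return mid
--     elif p < func[mid][0] :
--         if p >= func[mid-1][0] and p < func[mid][0] :
--             return mid-1
--         else :
--             return find_index_p(func, p, start, mid-1)
--     else :
--         if p > func[mid][0] and p < func[mid+1][0] :
--             return mid
--         elif p == func[mid+1][0] :
--             return mid+1
--         else :
--             return find_index_p(func, p, mid+1, end)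
--
-- def make_short(func, p, q, short_x, short_y) :
--     Maximize = 0
--     m = 0
--     n = 0
--     Max = 0
--     if func[0][0] > q :
--         short_x.append(0)
--         short_y.append(0)
--         return short_x, short_y, Maximize, Max
--     elif func[len(func)-1][0] < p :
--         Maximize = func[len(func)-1][1]
--         return [p, q],[Maximize], Maximize, Max
--     elif func[0][0] == q :
--         short_x = [p, q]
--         short_y = [func[0][1]]
--         return [p, q], [func[0][1]], Maximize, Max
--     else :
--         if len(func) == 1 :
--             short_x.append(func[0][0])
--             short_y.append(func[0][1])
--         else :
--             m = find_index_p(func, p, 0, len(func)-1)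
--             if func[m][0] <= p and func[m+1][0] > p :
--                 short_x.append(p)
--                 Max = 0
--                 for i in range(m+1) :
--                     Max = max(Max, func[i][1])
--                 short_y.append(Max)
--                 #Max = func[m][1]
--                 m = m+1
--             for s in range(m, len(func)) :
--                 if func[s][0] > q :
--                     break
--                 if s == 0 :
--                     short_x.append(func[s][0])
--                     short_y.append(func[s][1])
--                     Max = max(func[s][1], Max) ## Wrong answer의 이유 (04/01)
--                 else : ### 가정문을 없앰으로서 time limit을 줄여봄 (04/01)
--                     if func[s][0] == func[s-1][0] :
--                         short_y.pop()
--                         short_y.append(max(Max, func[s][1]))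
--                         Max = max(Max, func[s][1])
--                     else :
--                         short_x.append(func[s][0])
--                         short_y.append(max(Max, func[s][1]))
--                         Max = max(Max, func[s][1])
--     return short_x, short_y, Maximize, Max
-- ===== SOURCE B (Python) =====
-- def make_short(func, p, q, short_x, short_y):
--     if func[0][0] > q:
--         short_x.append(0)
--         short_y.append(0)
--         return short_x, short_y, 0, 0
--     if func[-1][0] < p:
--         top = func[-1][1]
--         return [p, q], [top], top, 0
--     if func[0][0] == q:
--         return [p, q], [func[0][1]], 0, 0
--     if len(func) == 1:
--         short_x.append(func[0][0])
--         short_y.append(func[0][1])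
--         return short_x, short_y, 0, 0
--     # iterative binary search: largest m with func[m][0] <= p (m = 0 if p < func[0][0])
--     lo, hi = 0, len(func) - 1
--     while lo < hi:
--         mid = (lo + hi + 1) // 2
--         if func[mid][0] <= p:
--             lo = mid
--         else:
--             hi = mid - 1
--     m = lo
--     if func[m][0] <= p:
--         Max = 0
--         for _, y in func[:m + 1]:
--             Max = max(Max, y)
--         out_x, out_y = [p], [Max]
--         prev = p
--         rest = func[m + 1:]
--     else:
--         x0, y0 = func[0]
--         out_x, out_y = [x0], [y0]
--         Max = max(y0, 0)
--         prev = x0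
--         rest = func[1:]
--     for x, y in rest:
--         if x > q:
--             break
--         Max = max(Max, y)
--         if x == prev:
--             out_y[-1] = Max          # merge duplicate breakpoint
--         else:
--             out_x.append(x)
--             out_y.append(Max)
--             prev = x
--     short_x += out_x
--     short_y += out_y
--     return short_x, short_y, 0, Max
-- ===== Notes on version B (the rewrite author's own statement) =====
-- stated objective: simpler
-- what changed: The recursive five-branch find_index_p is replaced by a plain iterative lo/hi binary-search loop, and the step-building pass is restructured to iterate over the list suffix carrying the previous appended breakpoint explicitly (first element handled outside the loop, duplicate breakpoints merged by updating the list end), extending short_x/short_y once at the end.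
-- outside the precondition, e.g. on make_short([(0, 5), (1, 0), (1, 0)], 1, 9, [], []): A returns ([1], [0], 0, 0), B returns ([1], [5], 0, 5)
import Mathlib
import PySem

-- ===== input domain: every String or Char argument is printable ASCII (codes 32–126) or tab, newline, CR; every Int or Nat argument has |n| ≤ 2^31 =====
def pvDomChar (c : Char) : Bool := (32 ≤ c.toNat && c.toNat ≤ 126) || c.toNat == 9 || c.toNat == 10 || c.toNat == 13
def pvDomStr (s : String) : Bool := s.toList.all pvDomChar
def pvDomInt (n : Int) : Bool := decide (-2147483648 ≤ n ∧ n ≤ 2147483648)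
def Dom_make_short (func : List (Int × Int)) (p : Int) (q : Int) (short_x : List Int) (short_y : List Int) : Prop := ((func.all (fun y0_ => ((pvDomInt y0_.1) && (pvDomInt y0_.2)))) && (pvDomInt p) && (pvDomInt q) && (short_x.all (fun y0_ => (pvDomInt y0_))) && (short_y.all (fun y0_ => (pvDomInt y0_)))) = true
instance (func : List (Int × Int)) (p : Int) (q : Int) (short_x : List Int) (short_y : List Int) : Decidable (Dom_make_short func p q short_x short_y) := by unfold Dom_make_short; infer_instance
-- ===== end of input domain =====

-- B replaces the recursive find_index_p by an iterative lo/hi binary-search loop and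
-- restructures the step-building pass to iterate over the list suffix, carrying the previous
-- appended breakpoint and merging duplicate breakpoints at the list end; objective: simpler.
-- Note on side effects: A and B both mutate short_x/short_y in place on the same branches;
-- the equivalence proved here is about the returned value.

-- ===== PORT A =====
-- fuel makes the recursion total; under Pre_ the depth is < func.length, so fuel is never exhausted.
-- list accesses use pyGetD: under Pre_ every access is in range (out of range = IndexError, excluded by Pre_).
def find_index_p (func : List (Int × Int)) (p : Int) (start : Int) (e : Int) (fuel : Nat) : Int :=
  match fuel with
  | 0 => 0
  | fuel + 1 =>
    let mid := PySem.Int.floordiv (start + e) 2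
    if p ≤ (PySem.List.pyGetD func 0 (0, 0)).1 then 0
    else if p = (PySem.List.pyGetD func mid (0, 0)).1 then mid
    else if p < (PySem.List.pyGetD func mid (0, 0)).1 then
      if (PySem.List.pyGetD func (mid - 1) (0, 0)).1 ≤ p ∧ p < (PySem.List.pyGetD func mid (0, 0)).1 then mid - 1
      else find_index_p func p start (mid - 1) fuel
    else
      if (PySem.List.pyGetD func mid (0, 0)).1 < p ∧ p < (PySem.List.pyGetD func (mid + 1) (0, 0)).1 then mid
      else if p = (PySem.List.pyGetD func (mid + 1) (0, 0)).1 then mid + 1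
      else find_index_p func p (mid + 1) e fuel

-- A's 'for s in range(m, len(func))' loop with its break and its three branches; s is the
-- running index (on Pre_ inputs A enters it with m ≥ 0, so a Nat index is exact).
-- 'short_y.pop()' is dropLast (pop of a nonempty list: the loop only pops after it appended).
def make_short_loopA (func : List (Int × Int)) (q : Int) (s : Nat) (sx sy : List Int) (Max : Int) : List Int × List Int × Int :=
  if h : s < func.length then
    if (func[s]).1 > q then (sx, sy, Max)
    else if s = 0 then
      make_short_loopA func q (s + 1) (sx ++ [(func[s]).1]) (sy ++ [(func[s]).2]) (max (func[s]).2 Max)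
    else if (func[s]).1 = (PySem.List.pyGetD func ((s : Int) - 1) (0, 0)).1 then
      make_short_loopA func q (s + 1) sx (sy.dropLast ++ [max Max (func[s]).2]) (max Max (func[s]).2)
    else
      make_short_loopA func q (s + 1) (sx ++ [(func[s]).1]) (sy ++ [max Max (func[s]).2]) (max Max (func[s]).2)
  else (sx, sy, Max)
termination_by func.length - s

def make_short (func : List (Int × Int)) (p : Int) (q : Int) (short_x : List Int) (short_y : List Int) : List Int × List Int × Int × Int :=
  let Maximize : Int := 0
  let f0 := PySem.List.pyGetD func 0 (0, 0)
  let fl := PySem.List.pyGetD func ((func.length : Int) - 1) (0, 0)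
  if f0.1 > q then (short_x ++ [0], short_y ++ [0], Maximize, 0)
  else if fl.1 < p then ([p, q], [fl.2], fl.2, 0)
  else if f0.1 = q then ([p, q], [f0.2], Maximize, 0)
  else if func.length = 1 then (short_x ++ [f0.1], short_y ++ [f0.2], Maximize, 0)
  else
    let m := find_index_p func p 0 ((func.length : Int) - 1) func.length
    if (PySem.List.pyGetD func m (0, 0)).1 ≤ p ∧ p < (PySem.List.pyGetD func (m + 1) (0, 0)).1 then
      let Max := (PySem.List.pyRange 0 (m + 1) 1).foldl (fun M i => max M (PySem.List.pyGetD func i (0, 0)).2) 0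
      let r := make_short_loopA func q (m + 1).toNat (short_x ++ [p]) (short_y ++ [Max]) Max
      (r.1, r.2.1, Maximize, r.2.2)
    else
      let r := make_short_loopA func q m.toNat short_x short_y 0
      (r.1, r.2.1, Maximize, r.2.2)

-- ===== PORT B =====
-- iterative binary search: while lo < hi: mid = (lo+hi+1)//2; ...  (fuel only makes the loop
-- total; under Pre_ hi - lo < fuel throughout, so it is never exhausted)
def make_short_bsearch (func : List (Int × Int)) (p : Int) (lo hi : Int) (fuel : Nat) : Int :=
  match fuel with
  | 0 => lo
  | fuel + 1 =>
    if lo < hi then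
      let mid := PySem.Int.floordiv (lo + hi + 1) 2
      if (PySem.List.pyGetD func mid (0, 0)).1 ≤ p then make_short_bsearch func p mid hi fuel
      else make_short_bsearch func p lo (mid - 1) fuel
    else lo

-- B's 'for x, y in rest' loop with its break; prev is the last breakpoint appended to out_x,
-- and 'out_y[-1] = Max' is dropLast ++ [Max] (out_y is nonempty whenever the loop runs)
def make_short_loopB (q : Int) (rest : List (Int × Int)) (prev : Int) (ox oy : List Int) (Max : Int) : List Int × List Int × Int :=
  match rest with
  | [] => (ox, oy, Max)
  | (x, y) :: t =>
    if x > q then (ox, oy, Max)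
    else if x = prev then make_short_loopB q t prev ox (oy.dropLast ++ [max Max y]) (max Max y)
    else make_short_loopB q t x (ox ++ [x]) (oy ++ [max Max y]) (max Max y)

def make_short_alt (func : List (Int × Int)) (p : Int) (q : Int) (short_x : List Int) (short_y : List Int) : List Int × List Int × Int × Int :=
  let f0 := PySem.List.pyGetD func 0 (0, 0)
  let fl := PySem.List.pyGetD func (-1) (0, 0)
  if f0.1 > q then (short_x ++ [0], short_y ++ [0], 0, 0)
  else if fl.1 < p then ([p, q], [fl.2], fl.2, 0)
  else if f0.1 = q then ([p, q], [f0.2], 0, 0)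
  else if func.length = 1 then (short_x ++ [f0.1], short_y ++ [f0.2], 0, 0)
  else
    let m := make_short_bsearch func p 0 ((func.length : Int) - 1) func.length
    if (PySem.List.pyGetD func m (0, 0)).1 ≤ p then
      -- func[:m+1] / func[m+1:] : m ≥ 0 always holds for this search, so take/drop are exact
      let Max := ((func.take (m.toNat + 1)).map Prod.snd).foldl (fun M y => max M y) 0
      let r := make_short_loopB q (func.drop (m.toNat + 1)) p [p] [Max] Max
      (short_x ++ r.1, short_y ++ r.2.1, 0, r.2.2)
    else
      let f0' := PySem.List.pyGetD func 0 (0, 0)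
      let r := make_short_loopB q (func.drop 1) f0'.1 [f0'.1] [f0'.2] (max f0'.2 0)
      (short_x ++ r.1, short_y ++ r.2.1, 0, r.2.2)

-- ===== PRECONDITION & SPEC =====
-- Pre_ excludes: empty func (A raises IndexError); and, when the search path is really taken
-- (none of the four early-return branches fires), it restricts to the binary search's natural
-- domain — breakpoint x-values non-decreasing (on unsorted input find_index_p's result is an
-- accident of the recursion midpoints) — and excludes p equal to the last breakpoint, where A
-- raises IndexError (func[m+1] with m = len-1), and p equal to a DUPLICATED breakpoint value,
-- a first-vs-last-occurrence corner where A's answer depends on which occurrence the recursion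
-- midpoints happen to hit (B always takes the last occurrence).
def Pre_make_short (func : List (Int × Int)) (p : Int) (q : Int) (short_x : List Int) (short_y : List Int) : Prop :=
  func ≠ [] ∧
    ((func.getD 0 (0, 0)).1 > q ∨ ((func.getLast?).getD (0, 0)).1 < p ∨
      (func.getD 0 (0, 0)).1 = q ∨ func.length = 1 ∨
      (List.IsChain (fun a b => a.1 ≤ b.1) func ∧ p ≠ ((func.getLast?).getD (0, 0)).1 ∧
        (func.map Prod.fst).count p ≤ 1))
instance (func : List (Int × Int)) (p : Int) (q : Int) (short_x : List Int) (short_y : List Int) : Decidable (Pre_make_short func p q short_x short_y) := by unfold Pre_make_short; infer_instance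

def pvWitness_make_short : (List (Int × Int)) × Int × Int × List Int × List Int := ([(0, 1), (2, 3)], 1, 5, [], [])

def Spec_make_short (func : List (Int × Int)) (p : Int) (q : Int) (short_x : List Int) (short_y : List Int) (out : List Int × List Int × Int × Int) : Prop := out = make_short_alt func p q short_x short_y
instance (func : List (Int × Int)) (p : Int) (q : Int) (short_x : List Int) (short_y : List Int) (out : List Int × List Int × Int × Int) : Decidable (Spec_make_short func p q short_x short_y out) := by unfold Spec_make_short; infer_instance

-- ===== CLAIM (what is proved, stated in full; the proofs are below) =====
def Claim_equal_make_short : Prop := ∀ (func : List (Int × Int)) (p : Int) (q : Int) (short_x : List Int) (short_y : List Int), Dom_make_short func p q short_x short_y → Pre_make_short func p q short_x short_y → Spec_make_short func p q short_x short_y (make_short func p q short_x short_y)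

-- ===== LEMMAS AND PROOFS =====

theorem pv_mono (func : List (Int × Int)) (hs : List.IsChain (fun a b => a.1 ≤ b.1) func)
    (i j : Int) (hi : 0 ≤ i) (hij : i ≤ j) (hj : j < (func.length : Int)) :
    (PySem.List.pyGetD func i (0, 0)).1 ≤ (PySem.List.pyGetD func j (0, 0)).1 := by
  rcases eq_or_lt_of_le hij with rfl | hij
  · exact le_rfl
  have hp : List.Pairwise (fun a b => a.1 ≤ b.1) func := by
    haveI : Trans (fun a b : Int × Int => a.1 ≤ b.1) (fun a b : Int × Int => a.1 ≤ b.1) (fun a b : Int × Int => a.1 ≤ b.1) := ⟨fun h1 h2 => le_trans h1 h2⟩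
    exact List.isChain_iff_pairwise.mp hs
  rw [List.pairwise_iff_getElem] at hp
  rw [PySem.List.pyGetD_eq_getElem _ _ hi (by omega),
      PySem.List.pyGetD_eq_getElem _ _ (by omega) (by omega)]
  exact hp i.toNat j.toNat (by omega) (by omega) (by omega)

-- p occurs at most once among the breakpoints: no two indices both carry x-value p
theorem pv_uniq (func : List (Int × Int)) (p : Int)
    (hs : List.IsChain (fun a b => a.1 ≤ b.1) func)
    (hc : (func.map Prod.fst).count p ≤ 1)
    (i j : Int) (hi : 0 ≤ i) (hij : i < j) (hj : j < (func.length : Int))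
    (hpi : (PySem.List.pyGetD func i (0, 0)).1 = p)
    (hpj : (PySem.List.pyGetD func j (0, 0)).1 = p) : False := by
  have mono := pv_mono func hs
  -- squeeze: the element at i+1 also equals p
  have hpi1 : (PySem.List.pyGetD func (i + 1) (0, 0)).1 = p := by
    have h1 := mono i (i + 1) hi (by omega) (by omega)
    have h2 := mono (i + 1) j (by omega) (by omega) hj
    omega
  have hnn : i.toNat + 1 < func.length := by omega
  have hfn : (func[i.toNat]'(by omega)).1 = p := by
    rw [← PySem.List.pyGetD_eq_getElem func (0, 0) hi (by omega)]
    exact hpi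
  have hfn1 : (func[i.toNat + 1]'hnn).1 = p := by
    have h1 : PySem.List.pyGetD func (i + 1) (0, 0) = func[(i + 1).toNat]'(by omega) :=
      PySem.List.pyGetD_eq_getElem func (0, 0) (by omega) (by omega)
    have h2 : (i + 1).toNat = i.toNat + 1 := by omega
    rw [h1] at hpi1
    simp only [h2] at hpi1
    exact hpi1
  -- the two adjacent elements form a sublist, so p is counted at least twice
  have hsub : List.Sublist [func[i.toNat]'(by omega), func[i.toNat + 1]'hnn] func := by
    have hd : List.Sublist [func[i.toNat]'(by omega), func[i.toNat + 1]'hnn] (func.drop i.toNat) := by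
      rw [List.drop_eq_getElem_cons (by omega : i.toNat < func.length),
          List.drop_eq_getElem_cons hnn]
      exact List.sublist_append_left [func[i.toNat]'(by omega), func[i.toNat + 1]'hnn] (func.drop (i.toNat + 2))
    exact hd.trans (List.drop_sublist _ _)
  have hmap := hsub.map Prod.fst
  simp only [List.map_cons, List.map_nil] at hmap
  rw [hfn, hfn1] at hmap
  have := hmap.count_le p
  simp at this
  omega

theorem pv_findA (func : List (Int × Int)) (p : Int)
    (hs : List.IsChain (fun a b => a.1 ≤ b.1) func)
    (hc : (func.map Prod.fst).count p ≤ 1)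
    (h0 : (PySem.List.pyGetD func 0 (0, 0)).1 < p) :
    ∀ (fuel : Nat) (s e m : Int), 0 ≤ s → s ≤ m → m ≤ e → e < (func.length : Int) →
      m + 1 < (func.length : Int) →
      (PySem.List.pyGetD func m (0, 0)).1 ≤ p → p < (PySem.List.pyGetD func (m + 1) (0, 0)).1 →
      e - s < (fuel : Int) →
      find_index_p func p s e fuel = m := by
  have Xle := pv_mono func hs
  have uniq := pv_uniq func p hs hc
  intro fuel
  induction fuel with
  | zero => intro s e m h0s hsm hme hen hm1 hxm hxm1 hf; exfalso; push_cast at hf; omega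
  | succ f ih =>
    intro s e m h0s hsm hme hen hm1 hxm hxm1 hf
    have hse : s ≤ e := le_trans hsm hme
    obtain ⟨hm1', hm2'⟩ := PySem.Int.floordiv_two_mid_bounds hse
    simp only [find_index_p]
    set mid := PySem.Int.floordiv (s + e) 2 with hmiddef
    split_ifs with h1 h2 h3 h4 h5 h6
    · exfalso; omega
    · -- p = X mid → mid = m
      by_contra hne
      rcases lt_or_gt_of_ne hne with hlt | hgt
      · -- mid < m : X m between X mid = p and p → X m = p, duplicate
        have := Xle mid m (by omega) (by omega) (by omega)
        exact uniq mid m (by omega) (by omega) (by omega) h2.symm (by omega)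
      · -- m < mid : X mid ≥ X (m+1) > p
        have := Xle (m + 1) mid (by omega) (by omega) (by omega)
        omega
    · -- p < X mid, guard true : mid - 1 = m
      have hmm : m < mid := by
        by_contra hcn
        have := Xle mid m (by omega) (by omega) (by omega)
        omega
      obtain ⟨hg1, _⟩ := h4
      by_contra hne
      have : m + 1 ≤ mid - 1 := by omega
      have := Xle (m + 1) (mid - 1) (by omega) (by omega) (by omega)
      omega
    · -- p < X mid, guard false : recurse left
      have hmm : m < mid := by
        by_contra hcn
        have := Xle mid m (by omega) (by omega) (by omega)
        omega
      have hg : ¬ (PySem.List.pyGetD func (mid - 1) (0, 0)).1 ≤ p := by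
        intro hcn; exact h4 ⟨hcn, h3⟩
      have hmm1 : m < mid - 1 := by
        by_contra hcn
        have := Xle (mid - 1) m (by omega) (by omega) (by omega)
        omega
      exact ih s (mid - 1) m h0s hsm (by omega) (by omega) hm1 hxm hxm1 (by push_cast at hf ⊢; omega)
    · -- X mid < p ∧ p < X (mid+1) : mid = m
      obtain ⟨hg1, hg2⟩ := h5
      have hXmid : (PySem.List.pyGetD func mid (0, 0)).1 < p := by omega
      have hmle : mid ≤ m := by
        by_contra hcn
        have := Xle (m + 1) mid (by omega) (by omega) (by omega)
        omega
      by_contra hne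
      have := Xle (mid + 1) m (by omega) (by omega) (by omega)
      omega
    · -- p = X (mid+1) : mid + 1 = m
      have hXmid : (PySem.List.pyGetD func mid (0, 0)).1 < p := by omega
      have hmle : mid ≤ m := by
        by_contra hcn
        have := Xle (m + 1) mid (by omega) (by omega) (by omega)
        omega
      by_contra hne
      rcases lt_or_gt_of_ne hne with hlt | hgt
      · -- mid+1 < m : X m between p and p → X m = p, duplicate with mid+1
        have := Xle (mid + 1) m (by omega) (by omega) (by omega)
        exact uniq (mid + 1) m (by omega) (by omega) (by omega) h6.symm (by omega)
      · -- m < mid+1, mid ≤ m → m = mid, then p = X(m+1) contra hxm1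
        have hmeq : m = mid := by omega
        rw [hmeq] at hxm1
        omega
    · -- recurse right
      have hXmid : (PySem.List.pyGetD func mid (0, 0)).1 < p := by omega
      have hmle : mid ≤ m := by
        by_contra hcn
        have := Xle (m + 1) mid (by omega) (by omega) (by omega)
        omega
      have hmidn : mid + 1 < (func.length : Int) := by omega
      have hg : (PySem.List.pyGetD func (mid + 1) (0, 0)).1 < p := by
        rcases lt_trichotomy (PySem.List.pyGetD func (mid + 1) (0, 0)).1 p with h | h | h
        · exact h
        · exact absurd h.symm h6
        · exact absurd ⟨hXmid, h⟩ h5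
      have hmle1 : mid + 1 ≤ m := by
        by_contra hcn
        have hmeq : m = mid := by omega
        rw [hmeq] at hxm1
        omega
      exact ih (mid + 1) e m (by omega) hmle1 hme hen hm1 hxm hxm1 (by push_cast at hf ⊢; omega)

theorem pv_findB (func : List (Int × Int)) (p : Int) (hs : List.IsChain (fun a b => a.1 ≤ b.1) func) :
    ∀ (fuel : Nat) (lo hi m : Int), 0 ≤ lo → lo ≤ m → m ≤ hi → hi < (func.length : Int) →
      m + 1 < (func.length : Int) →
      (PySem.List.pyGetD func m (0, 0)).1 ≤ p → p < (PySem.List.pyGetD func (m + 1) (0, 0)).1 →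
      hi - lo < (fuel : Int) →
      make_short_bsearch func p lo hi fuel = m := by
  have Xle := pv_mono func hs
  intro fuel
  induction fuel with
  | zero => intro lo hi m h0 hlm hmh hhn hm1 hxm hxm1 hf; exfalso; push_cast at hf; omega
  | succ f ih =>
    intro lo hi m h0 hlm hmh hhn hm1 hxm hxm1 hf
    simp only [make_short_bsearch]
    split_ifs with h1 h2
    · -- X mid ≤ p : recurse (mid, hi)
      have hb : lo + 1 ≤ PySem.Int.floordiv (lo + hi + 1) 2 ∧ PySem.Int.floordiv (lo + hi + 1) 2 ≤ hi := by
        have := PySem.Int.floordiv_two_mid_bounds (lo := lo + 1) (hi := hi) (by omega)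
        constructor
        · have h' := this.1; rw [show lo + 1 + hi = lo + hi + 1 by ring] at h'; exact h'
        · have h' := this.2; rw [show lo + 1 + hi = lo + hi + 1 by ring] at h'; exact h'
      set mid := PySem.Int.floordiv (lo + hi + 1) 2 with hmid
      have hmm : mid ≤ m := by
        by_contra hcn
        have := Xle (m + 1) mid (by omega) (by omega) (by omega)
        omega
      exact ih mid hi m (by omega) hmm hmh hhn hm1 hxm hxm1 (by push_cast at hf ⊢; omega)
    · -- X mid > p : recurse (lo, mid-1)
      have hb : lo + 1 ≤ PySem.Int.floordiv (lo + hi + 1) 2 ∧ PySem.Int.floordiv (lo + hi + 1) 2 ≤ hi := by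
        have := PySem.Int.floordiv_two_mid_bounds (lo := lo + 1) (hi := hi) (by omega)
        constructor
        · have h' := this.1; rw [show lo + 1 + hi = lo + hi + 1 by ring] at h'; exact h'
        · have h' := this.2; rw [show lo + 1 + hi = lo + hi + 1 by ring] at h'; exact h'
      set mid := PySem.Int.floordiv (lo + hi + 1) 2 with hmid
      have hmm : m ≤ mid - 1 := by
        by_contra hcn
        have := Xle mid m (by omega) (by omega) (by omega)
        omega
      exact ih lo (mid - 1) m h0 hlm hmm (by omega) hm1 hxm hxm1 (by push_cast at hf ⊢; omega)
    · omega

theorem pv_findB0 (func : List (Int × Int)) (p : Int)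
    (hall : ∀ j : Int, 1 ≤ j → j < (func.length : Int) → p < (PySem.List.pyGetD func j (0, 0)).1) :
    ∀ (fuel : Nat) (hi : Int), 0 ≤ hi → hi < (func.length : Int) → hi < (fuel : Int) →
      make_short_bsearch func p 0 hi fuel = 0 := by
  intro fuel
  induction fuel with
  | zero => intro hi h0 hn hf; exfalso; push_cast at hf; omega
  | succ f ih =>
    intro hi h0 hn hf
    simp only [make_short_bsearch]
    split_ifs with h1 h2
    · exfalso
      have hb : 0 + 1 ≤ PySem.Int.floordiv (0 + hi + 1) 2 ∧ PySem.Int.floordiv (0 + hi + 1) 2 ≤ hi := by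
        have := PySem.Int.floordiv_two_mid_bounds (lo := 0 + 1) (hi := hi) (by omega)
        constructor
        · have h' := this.1; rw [show 0 + 1 + hi = 0 + hi + 1 by ring] at h'; exact h'
        · have h' := this.2; rw [show 0 + 1 + hi = 0 + hi + 1 by ring] at h'; exact h'
      have := hall (PySem.Int.floordiv (0 + hi + 1) 2) (by omega) (by omega)
      omega
    · have hb : 0 + 1 ≤ PySem.Int.floordiv (0 + hi + 1) 2 ∧ PySem.Int.floordiv (0 + hi + 1) 2 ≤ hi := by
        have := PySem.Int.floordiv_two_mid_bounds (lo := 0 + 1) (hi := hi) (by omega)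
        constructor
        · have h' := this.1; rw [show 0 + 1 + hi = 0 + hi + 1 by ring] at h'; exact h'
        · have h' := this.2; rw [show 0 + 1 + hi = 0 + hi + 1 by ring] at h'; exact h'
      exact ih (PySem.Int.floordiv (0 + hi + 1) 2 - 1) (by omega) (by omega) (by push_cast at hf ⊢; omega)
    · rfl

theorem pv_exists_m (func : List (Int × Int)) (p : Int)
    (hn : 2 ≤ func.length)
    (h0 : (PySem.List.pyGetD func 0 (0, 0)).1 < p)
    (hl : p < (PySem.List.pyGetD func ((func.length : Int) - 1) (0, 0)).1) :
    ∃ m : Nat, (m : Int) + 1 < (func.length : Int) ∧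
      (PySem.List.pyGetD func (m : Int) (0, 0)).1 ≤ p ∧
      p < (PySem.List.pyGetD func ((m : Int) + 1) (0, 0)).1 := by
  have hex : ∃ k : Nat, k < func.length ∧ p < (PySem.List.pyGetD func (k : Int) (0, 0)).1 := by
    refine ⟨func.length - 1, by omega, ?_⟩
    have : ((func.length - 1 : Nat) : Int) = (func.length : Int) - 1 := by omega
    rw [this]; exact hl
  classical
  let k0 := Nat.find hex
  have hk0 := Nat.find_spec hex
  have hk0ne : k0 ≠ 0 := by
    intro hcn
    have := hk0.2
    rw [show ((k0 : Int)) = 0 by simp [hcn]] at this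
    omega
  have hprev : ¬ (k0 - 1 < func.length ∧ p < (PySem.List.pyGetD func ((k0 - 1 : Nat) : Int) (0, 0)).1) :=
    Nat.find_min hex (by omega)
  refine ⟨k0 - 1, by push_cast; omega, ?_, ?_⟩
  · by_contra hcn
    exact hprev ⟨by omega, by omega⟩
  · have : ((k0 - 1 : Nat) : Int) + 1 = (k0 : Int) := by omega
    rw [this]; exact hk0.2

theorem pv_prefmax (func : List (Int × Int)) : ∀ k : Nat, k ≤ func.length →
    (PySem.List.pyRange 0 (k : Int) 1).foldl (fun M i => max M (PySem.List.pyGetD func i (0, 0)).2) 0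
      = ((func.take k).map Prod.snd).foldl (fun M y => max M y) 0 := by
  intro k
  induction k with
  | zero => intro _; simp [PySem.List.pyRange]
  | succ k ih =>
    intro hk
    rw [show ((k + 1 : Nat) : Int) = (k : Int) + 1 by push_cast; ring,
        PySem.List.pyRange_one_succ_right (by omega),
        List.foldl_append,
        List.take_succ, List.map_append, List.foldl_append, ih (by omega)]
    rw [List.getElem?_eq_getElem (by omega : k < func.length)]
    simp [PySem.List.pyGetD_eq_getElem func (i := (k : Int)) (0, 0) (by omega) (by push_cast; omega)]

-- the two loops agree when B's 'prev' is exactly the x-value at index s-1 (A's func[s-1])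
theorem pv_loop (func : List (Int × Int)) (q : Int) :
    ∀ (s : Nat) (sx sy ox oy : List Int) (M : Int), 1 ≤ s → oy ≠ [] →
      make_short_loopA func q s (sx ++ ox) (sy ++ oy) M =
        ((sx ++ (make_short_loopB q (func.drop s) (PySem.List.pyGetD func ((s : Int) - 1) (0, 0)).1 ox oy M).1,
          sy ++ (make_short_loopB q (func.drop s) (PySem.List.pyGetD func ((s : Int) - 1) (0, 0)).1 ox oy M).2.1,
          (make_short_loopB q (func.drop s) (PySem.List.pyGetD func ((s : Int) - 1) (0, 0)).1 ox oy M).2.2)) := by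
  have key : ∀ (k s : Nat), func.length - s ≤ k → ∀ (sx sy ox oy : List Int) (M : Int), 1 ≤ s → oy ≠ [] →
      make_short_loopA func q s (sx ++ ox) (sy ++ oy) M =
        ((sx ++ (make_short_loopB q (func.drop s) (PySem.List.pyGetD func ((s : Int) - 1) (0, 0)).1 ox oy M).1,
          sy ++ (make_short_loopB q (func.drop s) (PySem.List.pyGetD func ((s : Int) - 1) (0, 0)).1 ox oy M).2.1,
          (make_short_loopB q (func.drop s) (PySem.List.pyGetD func ((s : Int) - 1) (0, 0)).1 ox oy M).2.2)) := by
    intro k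
    induction k with
    | zero =>
      intro s hk sx sy ox oy M hs1 hoy
      have hsl : func.length ≤ s := by omega
      rw [make_short_loopA, dif_neg (by omega), List.drop_of_length_le hsl]
      rfl
    | succ k ih =>
      intro s hk sx sy ox oy M hs1 hoy
      by_cases h : s < func.length
      · rw [List.drop_eq_getElem_cons h]
        rw [make_short_loopA, dif_pos h]
        rcases hfs : func[s] with ⟨x, y⟩
        dsimp only
        simp only [make_short_loopB]
        by_cases hq : x > q
        · rw [if_pos hq, if_pos hq]
        · rw [if_neg hq, if_neg hq, if_neg (by omega : ¬ s = 0)]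
          by_cases hdup : x = (PySem.List.pyGetD func ((s : Int) - 1) (0, 0)).1
          · rw [if_pos hdup, if_pos hdup]
            have hdl : (sy ++ oy).dropLast = sy ++ oy.dropLast := List.dropLast_append_of_ne_nil hoy
            rw [hdl, show sy ++ oy.dropLast ++ [max M y] = sy ++ (oy.dropLast ++ [max M y]) by simp]
            have hprev : (PySem.List.pyGetD func (((s + 1 : Nat) : Int) - 1) (0, 0)).1 = (PySem.List.pyGetD func ((s : Int) - 1) (0, 0)).1 := by
              have hsx : (PySem.List.pyGetD func (((s + 1 : Nat) : Int) - 1) (0, 0)) = func[s] := by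
                rw [PySem.List.pyGetD_eq_getElem func (0, 0) (by omega) (by push_cast; omega)]
                congr 1
                omega
              rw [hsx, hfs]
              exact hdup
            rw [← hprev]
            exact ih (s + 1) (by omega) sx sy ox (oy.dropLast ++ [max M y]) (max M y) (by omega) (by simp)
          · rw [if_neg hdup, if_neg hdup]
            rw [show sx ++ ox ++ [x] = sx ++ (ox ++ [x]) by simp,
                show sy ++ oy ++ [max M y] = sy ++ (oy ++ [max M y]) by simp]
            have hprev : (PySem.List.pyGetD func (((s + 1 : Nat) : Int) - 1) (0, 0)).1 = x := by
              have hsx : (PySem.List.pyGetD func (((s + 1 : Nat) : Int) - 1) (0, 0)) = func[s] := by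
                rw [PySem.List.pyGetD_eq_getElem func (0, 0) (by omega) (by push_cast; omega)]
                congr 1
                omega
              rw [hsx, hfs]
            have happ := ih (s + 1) (by omega) sx sy (ox ++ [x]) (oy ++ [max M y]) (max M y) (by omega) (by simp)
            rw [hprev] at happ
            exact happ
      · rw [make_short_loopA, dif_neg h, List.drop_of_length_le (by omega)]
        rfl
  intro s
  exact key (func.length - s) s (le_refl _)

-- entering the loop right after the inserted point p: one manual step, then pv_loop
theorem pv_loopStart (func : List (Int × Int)) (p q : Int) (s : Nat) (sx sy : List Int) (Mx : Int)
    (hs1 : 1 ≤ s) (hsp : (PySem.List.pyGetD func ((s : Int) - 1) (0, 0)).1 ≤ p)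
    (hps : ∀ h : s < func.length, p < (func[s]).1) :
    make_short_loopA func q s (sx ++ [p]) (sy ++ [Mx]) Mx =
      ((sx ++ (make_short_loopB q (func.drop s) p [p] [Mx] Mx).1,
        sy ++ (make_short_loopB q (func.drop s) p [p] [Mx] Mx).2.1,
        (make_short_loopB q (func.drop s) p [p] [Mx] Mx).2.2)) := by
  by_cases h : s < func.length
  · rw [List.drop_eq_getElem_cons h]
    rw [make_short_loopA, dif_pos h]
    rcases hfs : func[s] with ⟨x, y⟩
    have hpx : p < x := by have := hps h; rw [hfs] at this; exact this
    dsimp only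
    simp only [make_short_loopB]
    by_cases hq : x > q
    · rw [if_pos hq, if_pos hq]
    · rw [if_neg hq, if_neg hq, if_neg (by omega : ¬ s = 0)]
      rw [if_neg (by omega : ¬ x = (PySem.List.pyGetD func ((s : Int) - 1) (0, 0)).1), if_neg (by omega : ¬ x = p)]
      rw [show sx ++ [p] ++ [x] = sx ++ ([p] ++ [x]) by simp,
          show sy ++ [Mx] ++ [max Mx y] = sy ++ ([Mx] ++ [max Mx y]) by simp]
      have hprev : (PySem.List.pyGetD func (((s + 1 : Nat) : Int) - 1) (0, 0)).1 = x := by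
        have hsx : (PySem.List.pyGetD func (((s + 1 : Nat) : Int) - 1) (0, 0)) = func[s] := by
          rw [PySem.List.pyGetD_eq_getElem func (0, 0) (by omega) (by push_cast; omega)]
          congr 1
          omega
        rw [hsx, hfs]
      have happ := pv_loop func q (s + 1) sx sy ([p] ++ [x]) ([Mx] ++ [max Mx y]) (max Mx y) (by omega) (by simp)
      rw [hprev] at happ
      exact happ
  · rw [make_short_loopA, dif_neg h, List.drop_of_length_le (by omega)]
    rfl

-- ===== VERDICT (by name: the statement is the Claim_ definition above) =====
theorem make_short_spec : Claim_equal_make_short := by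
  unfold Claim_equal_make_short
  intro func p q sx sy hdom hpre
  obtain ⟨hne, hrest⟩ := hpre
  have hn1 : 1 ≤ func.length := List.length_pos_of_ne_nil hne
  have hfl : PySem.List.pyGetD func (-1) (0, 0) = PySem.List.pyGetD func ((func.length : Int) - 1) (0, 0) := by
    rw [PySem.List.pyGetD_neg_one _ _ hne,
        PySem.List.pyGetD_eq_getElem func (0, 0) (by omega) (by omega),
        List.getLast_eq_getElem]
    congr 1
    omega
  have hgd0 : func.getD 0 (0, 0) = PySem.List.pyGetD func 0 (0, 0) :=
    (PySem.List.pyGetD_zero func (0, 0)).symm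
  have hlq : (func.getLast?).getD (0, 0) = PySem.List.pyGetD func ((func.length : Int) - 1) (0, 0) := by
    rw [List.getLast?_eq_getLast hne]
    simp only [Option.getD_some]
    rw [← PySem.List.pyGetD_neg_one _ _ hne, hfl]
  rw [hgd0, hlq] at hrest
  unfold Spec_make_short make_short make_short_alt
  rw [hfl]
  by_cases h1 : (PySem.List.pyGetD func 0 (0, 0)).1 > q
  · simp only [if_pos h1]
  rw [if_neg h1, if_neg h1]
  by_cases h2 : (PySem.List.pyGetD func ((func.length : Int) - 1) (0, 0)).1 < p
  · simp only [if_pos h2]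
  rw [if_neg h2, if_neg h2]
  by_cases h3 : (PySem.List.pyGetD func 0 (0, 0)).1 = q
  · simp only [if_pos h3]
  rw [if_neg h3, if_neg h3]
  by_cases h4 : func.length = 1
  · simp only [if_pos h4]
  rw [if_neg h4, if_neg h4]
  -- main branch: 2 ≤ n, x0 < q, p ≤ x(n-1), p ≠ x(n-1); Pre_'s last disjunct must hold
  have hn2 : 2 ≤ func.length := by omega
  have hx0q : (PySem.List.pyGetD func 0 (0, 0)).1 < q := by omega
  obtain ⟨hchain, hne', hcnt⟩ : List.IsChain (fun a b => a.1 ≤ b.1) func ∧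
      p ≠ (PySem.List.pyGetD func ((func.length : Int) - 1) (0, 0)).1 ∧
      (func.map Prod.fst).count p ≤ 1 := by
    rcases hrest with h | h | h | h | h
    · omega
    · omega
    · omega
    · omega
    · exact h
  have Xle := pv_mono func hchain
  have uniq := pv_uniq func p hchain hcnt
  have hplast : p < (PySem.List.pyGetD func ((func.length : Int) - 1) (0, 0)).1 := by omega
  by_cases hp0 : (PySem.List.pyGetD func 0 (0, 0)).1 < p
  · -- x0 < p : both searches return the bracketing index m*
    obtain ⟨m, hm1, hxm, hxm1⟩ := pv_exists_m func p hn2 hp0 hplast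
    have hA : find_index_p func p 0 ((func.length : Int) - 1) func.length = (m : Int) :=
      pv_findA func p hchain hcnt hp0 func.length 0 ((func.length : Int) - 1) (m : Int)
        (by omega) (by omega) (by omega) (by omega) hm1 hxm hxm1 (by omega)
    have hB : make_short_bsearch func p 0 ((func.length : Int) - 1) func.length = (m : Int) :=
      pv_findB func p hchain func.length 0 ((func.length : Int) - 1) (m : Int)
        (by omega) (by omega) (by omega) (by omega) hm1 hxm hxm1 (by omega)
    rw [hA, hB, if_pos ⟨hxm, hxm1⟩, if_pos hxm]
    dsimp only
    have hmax : (PySem.List.pyRange 0 ((m : Int) + 1) 1).foldl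
        (fun M i => max M (PySem.List.pyGetD func i (0, 0)).2) 0
        = ((func.take ((m : Int).toNat + 1)).map Prod.snd).foldl (fun M y => max M y) 0 := by
      rw [show ((m : Int) + 1) = ((m + 1 : Nat) : Int) by push_cast; ring,
          show (m : Int).toNat + 1 = m + 1 by omega]
      exact pv_prefmax func (m + 1) (by omega)
    rw [hmax]
    rw [show ((m : Int) + 1).toNat = (m : Int).toNat + 1 by omega]
    have hstart := pv_loopStart func p q ((m : Int).toNat + 1) sx sy
      (((func.take ((m : Int).toNat + 1)).map Prod.snd).foldl (fun M y => max M y) 0)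
      (by omega)
      (by
        have h' := hxm
        rwa [show (m : Int) = (((((m : Int).toNat + 1 : Nat)) : Int) - 1) by omega] at h')
      (by
        intro h
        have : (func[(m : Int).toNat + 1]'h) = PySem.List.pyGetD func ((m : Int) + 1) (0, 0) := by
          rw [PySem.List.pyGetD_eq_getElem func (0, 0) (by omega) (by omega)]
          congr 1
        rw [this]
        exact hxm1)
    rw [hstart]
  · -- p ≤ x0 : both searches return 0
    have hp0' : p ≤ (PySem.List.pyGetD func 0 (0, 0)).1 := by omega
    have hA : find_index_p func p 0 ((func.length : Int) - 1) func.length = 0 := by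
      obtain ⟨f, hf⟩ : ∃ f, func.length = f + 1 := ⟨func.length - 1, by omega⟩
      rw [hf]
      simp only [find_index_p]
      rw [if_pos hp0']
    have hB : make_short_bsearch func p 0 ((func.length : Int) - 1) func.length = 0 := by
      apply pv_findB0 func p
      · intro j hj1 hjn
        have hle := Xle 0 j (by omega) (by omega) hjn
        rcases lt_or_eq_of_le hp0' with hlt | heq
        · omega
        · -- p = x0 : x j = p would duplicate p at indices 0 and j
          by_contra hcn
          have hxj : (PySem.List.pyGetD func j (0, 0)).1 = p := by omega
          exact uniq 0 j (by omega) (by omega) hjn heq.symm hxj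
      · omega
      · omega
      · omega
    rw [hA, hB]
    by_cases hpe : (PySem.List.pyGetD func (0 : Int) (0, 0)).1 ≤ p
    · -- p = x0
      have heq : (PySem.List.pyGetD func 0 (0, 0)).1 = p := by omega
      have hx01 : p < (PySem.List.pyGetD func ((0 : Int) + 1) (0, 0)).1 := by
        rw [show ((0 : Int) + 1) = (1 : Int) by norm_num]
        have hle := Xle 0 1 (by omega) (by omega) (by push_cast; omega)
        by_contra hcn
        have hxj : (PySem.List.pyGetD func 1 (0, 0)).1 = p := by omega
        exact uniq 0 1 (by omega) (by omega) (by push_cast; omega) heq hxj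
      rw [if_pos ⟨hpe, hx01⟩, if_pos hpe]
      dsimp only
      have hmax : (PySem.List.pyRange 0 ((0 : Int) + 1) 1).foldl
          (fun M i => max M (PySem.List.pyGetD func i (0, 0)).2) 0
          = ((func.take ((0 : Int).toNat + 1)).map Prod.snd).foldl (fun M y => max M y) 0 := by
        rw [show ((0 : Int) + 1) = ((1 : Nat) : Int) by norm_num,
            show (0 : Int).toNat + 1 = 1 by omega]
        exact pv_prefmax func 1 (by omega)
      rw [hmax]
      rw [show ((0 : Int) + 1).toNat = (0 : Int).toNat + 1 by omega]
      have hstart := pv_loopStart func p q ((0 : Int).toNat + 1) sx sy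
        (((func.take ((0 : Int).toNat + 1)).map Prod.snd).foldl (fun M y => max M y) 0)
        (by omega)
        (by
          have h' := hpe
          rwa [show (0 : Int) = ((((0 : Int).toNat + 1 : Nat) : Int) - 1) by omega] at h')
        (by
          intro h
          have : (func[(0 : Int).toNat + 1]'h) = PySem.List.pyGetD func ((0 : Int) + 1) (0, 0) := by
            rw [PySem.List.pyGetD_eq_getElem func (0, 0) (by omega) (by omega)]
            congr 1
          rw [this]
          exact hx01)
      rw [hstart]
    · -- p < x0 : no p-insertion; A starts its loop at s = 0
      rw [if_neg (by intro hcn; exact hpe hcn.1), if_neg hpe]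
      dsimp only
      have h0n : 0 < func.length := by omega
      rw [make_short_loopA]
      simp only [Int.toNat_zero]
      rw [dif_pos h0n]
      have hgel : func[0]'h0n = PySem.List.pyGetD func 0 (0, 0) :=
        (PySem.List.pyGetD_eq_getElem func (i := 0) (0, 0) (by omega) (by omega)).symm
      rw [hgel]
      rw [if_neg (by omega)]
      simp only [if_true]
      rw [show (0 : Nat) + 1 = 1 from rfl]
      have hloop := pv_loop func q 1 sx sy [(PySem.List.pyGetD func 0 (0, 0)).1]
        [(PySem.List.pyGetD func 0 (0, 0)).2] (max (PySem.List.pyGetD func 0 (0, 0)).2 0) (by omega) (by simp)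
      rw [show (((1 : Nat) : Int) - 1) = (0 : Int) by norm_num] at hloop
      rw [hloop]
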